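-- pv_equiv track=rewrite | github.com/robertsa28/Connect-Four | Board.py | has_winning_substring
-- ===== SOURCE A (Python) =====
-- def has_winning_substring(s):
--     # TO BE IMPLEMENTED
--     if len(s) < 4:
--     	return False
--     else:
--     	for i in range(0, len(s) - 3):
--     		if s[i:i + 4] == "XXXX" or s[i:i + 4] == "0000":
--     			return True
--     return False
-- ===== SOURCE B (Python) =====
-- def has_winning_substring(s):
--     prev = ''
--     run = 0
--     for ch in s:
--         if ch == 'X' or ch == '0':
--             run = run + 1 if ch == prev else 1
--         else:
--             run = 0
--         prev = ch
--         if run >= 4: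
--             return True
--     return False
-- ===== Notes on version B (the rewrite author's own statement) =====
-- stated objective: faster
-- what changed: B replaces A's windowed comparison of fixed 4-character slices with a single left-to-right scan maintaining a run-length counter of consecutive equal winning characters, returning as soon as the run reaches 4.
import Mathlib
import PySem

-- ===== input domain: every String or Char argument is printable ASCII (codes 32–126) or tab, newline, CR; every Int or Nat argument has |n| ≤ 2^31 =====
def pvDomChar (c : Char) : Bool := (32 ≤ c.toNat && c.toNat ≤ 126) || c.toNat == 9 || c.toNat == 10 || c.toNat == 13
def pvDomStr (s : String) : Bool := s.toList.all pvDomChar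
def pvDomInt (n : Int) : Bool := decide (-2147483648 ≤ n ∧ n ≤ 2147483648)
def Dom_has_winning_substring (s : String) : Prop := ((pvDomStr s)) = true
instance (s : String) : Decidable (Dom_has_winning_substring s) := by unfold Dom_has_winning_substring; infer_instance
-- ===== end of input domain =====

-- B replaces A's fixed 4-character slice comparisons with a single run-length-counting scan (alternative decomposition, same cost).

-- ===== PORT A =====
def has_winning_substring (s : String) : Bool :=
  if PySem.Str.len s < 4 then false
  else
    (PySem.List.pyRange 0 (PySem.Str.len s - 3) 1).any fun i =>
      PySem.List.slice s.toList (some i) (some (i + 4)) == ['X', 'X', 'X', 'X'] ||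
      PySem.List.slice s.toList (some i) (some (i + 4)) == ['0', '0', '0', '0']

-- ===== PORT B =====
def pvRunScan : List Char → Char → Nat → Bool
  | [], _, _ => false
  | c :: rest, prev, run =>
    let run' : Nat := if c = 'X' ∨ c = '0' then (if c = prev then run + 1 else 1) else 0
    if 4 ≤ run' then true else pvRunScan rest c run'

def has_winning_substring_alt (s : String) : Bool :=
  pvRunScan s.toList ' ' 0

-- ===== PRECONDITION & SPEC =====
def Spec_has_winning_substring (s : String) (out : Bool) : Prop := out = has_winning_substring_alt s
instance (s : String) (out : Bool) : Decidable (Spec_has_winning_substring s out) := by unfold Spec_has_winning_substring; infer_instance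

-- ===== CLAIM (what is proved, stated in full; the proofs are below) =====
def Claim_equal_has_winning_substring : Prop := ∀ (s : String), Dom_has_winning_substring s → Spec_has_winning_substring s (has_winning_substring s)

-- ===== LEMMAS AND PROOFS =====

-- midpoint characterisation: win4 cs = "cs has a window of four equal winning chars";
-- winB a t = "the window starting at a (followed by t) wins"
def winB (a : Char) (t : List Char) : Bool :=
  (t[0]? == some a) && (t[1]? == some a) && (t[2]? == some a) && (a == 'X' || a == '0')

def win4 : List Char → Bool
  | [] => false
  | a :: t => winB a t || win4 t

lemma winB_short (a : Char) (t : List Char) (h : t.length < 3) : winB a t = false := by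
  have h2 : t[2]? = none := by
    rw [List.getElem?_eq_none_iff]; omega
  simp [winB, h2]

lemma win4_short : ∀ cs : List Char, cs.length < 4 → win4 cs = false := by
  intro cs
  induction cs with
  | nil => intro _; rfl
  | cons a t ih =>
    intro h
    simp only [List.length_cons] at h
    simp [win4, winB_short a t (by omega), ih (by omega)]

lemma winB_iff (a : Char) (t : List Char) :
    winB a t = true ↔
      ((a :: t).take 4 = ['X', 'X', 'X', 'X'] ∨ (a :: t).take 4 = ['0', '0', '0', '0']) := by
  rcases t with _ | ⟨b, _ | ⟨c, _ | ⟨d, t⟩⟩⟩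
  all_goals simp [winB, List.take_succ_cons]
  all_goals aesop

lemma win4_iff : ∀ cs : List Char, win4 cs = true ↔
    ∃ k : Nat, (cs.drop k).take 4 = ['X', 'X', 'X', 'X'] ∨ (cs.drop k).take 4 = ['0', '0', '0', '0'] := by
  intro cs
  induction cs with
  | nil => simp [win4]
  | cons a t ih =>
    simp only [win4, Bool.or_eq_true, winB_iff, ih]
    constructor
    · rintro (h | ⟨k, hk⟩)
      · exact ⟨0, by simpa using h⟩
      · exact ⟨k + 1, by simpa using hk⟩
    · rintro ⟨k, hk⟩
      cases k with
      | zero => exact Or.inl (by simpa using hk)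
      | succ k => exact Or.inr ⟨k, by simpa using hk⟩

lemma slice4 (cs : List Char) (k : Nat) :
    PySem.List.slice cs (some (k : Int)) (some ((k : Int) + 4)) = (cs.drop k).take 4 := by
  have := PySem.List.slice_natCast_add (xs := cs) (j := k) (n := 4)
  simpa using this

lemma A_eq_win4 (s : String) : has_winning_substring s = win4 s.toList := by
  have hlen : PySem.Str.len s = (s.toList.length : Int) := by
    simp [PySem.Str.len_eq]
  by_cases h4 : PySem.Str.len s < 4
  · have hl : s.toList.length < 4 := by rw [hlen] at h4; exact_mod_cast h4
    rw [win4_short s.toList hl]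
    unfold has_winning_substring
    rw [if_pos h4]
  · rw [Bool.eq_iff_iff]
    unfold has_winning_substring
    rw [if_neg h4]
    simp only [List.any_eq_true]
    rw [win4_iff]
    constructor
    · rintro ⟨i, hi, hwin⟩
      rw [PySem.List.mem_pyRange_one] at hi
      obtain ⟨k, rfl⟩ := Int.eq_ofNat_of_zero_le hi.1
      rw [slice4] at hwin
      simp only [Bool.or_eq_true, beq_iff_eq] at hwin
      exact ⟨k, hwin⟩
    · rintro ⟨k, hk⟩
      have hlen4 : (k : Nat) + 4 ≤ s.toList.length := by
        have h1 : ((s.toList.drop k).take 4).length = 4 := by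
          rcases hk with h | h <;> rw [h] <;> rfl
        have hsl : s.length = s.toList.length := by simp
        simp [List.length_take, List.length_drop] at h1
        omega
      refine ⟨(k : Int), ?_, ?_⟩
      · rw [PySem.List.mem_pyRange_one]
        constructor
        · positivity
        · have hsl : s.length = s.toList.length := by simp
          rw [hlen]; omega
      · rw [slice4]
        simp only [Bool.or_eq_true, beq_iff_eq]
        exact hk

lemma win4_cons_notwin (c : Char) (cs : List Char) (h1 : c ≠ 'X') (h2 : c ≠ '0') :
    win4 (c :: cs) = win4 cs := by
  simp [win4, winB, h1, h2]

lemma win4_prefix (run : Nat) (prev c : Char) (cs : List Char) (hr : run ≤ 3)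
    (h : run = 0 ∨ c ≠ prev) :
    win4 (List.replicate run prev ++ c :: cs) = win4 (c :: cs) := by
  interval_cases run
  · simp
  all_goals {
    have hne : c ≠ prev := h.resolve_left (by omega)
    have hb : (c == prev) = false := by simp [hne]
    simp [win4, winB, List.replicate, hb] }

lemma pvRunScan_eq : ∀ (cs : List Char) (prev : Char) (run : Nat), run < 4 →
    (run = 0 ∨ prev = 'X' ∨ prev = '0') →
    pvRunScan cs prev run = win4 (List.replicate run prev ++ cs) := by
  intro cs
  induction cs with
  | nil =>
    intro prev run hr _
    rw [List.append_nil, win4_short _ (by simp; omega)]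
    rfl
  | cons c rest ih =>
    intro prev run hr hw
    by_cases hc : c = 'X' ∨ c = '0'
    · by_cases hp : c = prev
      · by_cases h3 : run = 3
        · -- run' = 4: both sides are true
          subst h3; subst hp
          have : pvRunScan (c :: rest) c 3 = true := by
            simp [pvRunScan, hc]
          rw [this]
          simp [List.replicate, win4, winB, hc]
        · have hlt : run + 1 < 4 := by omega
          subst hp
          have step : pvRunScan (c :: rest) c run = pvRunScan rest c (run + 1) := by
            simp only [pvRunScan, hc, if_true]
            rw [if_neg (by omega)]
          rw [step, ih c (run + 1) hlt (Or.inr hc)]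
          congr 1
          rw [List.replicate_succ']
          simp
      · have step : pvRunScan (c :: rest) prev run = pvRunScan rest c 1 := by
          simp [pvRunScan, hc, hp]
        rw [step, ih c 1 (by omega) (Or.inr hc)]
        rw [win4_prefix run prev c rest (by omega) (Or.inr hp)]
        simp [List.replicate]
    · have hp : run = 0 ∨ c ≠ prev := by
        rcases hw with h0 | h1 | h1
        · exact Or.inl h0
        · exact Or.inr (by rintro rfl; exact hc (Or.inl h1))
        · exact Or.inr (by rintro rfl; exact hc (Or.inr h1))
      have step : pvRunScan (c :: rest) prev run = pvRunScan rest c 0 := by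
        simp [pvRunScan, hc]
      rw [step, ih c 0 (by omega) (Or.inl rfl)]
      rw [win4_prefix run prev c rest (by omega) hp]
      rw [win4_cons_notwin c rest (fun h => hc (Or.inl h)) (fun h => hc (Or.inr h))]
      simp

lemma B_eq_win4 (s : String) : has_winning_substring_alt s = win4 s.toList := by
  have h := pvRunScan_eq s.toList ' ' 0 (by omega) (Or.inl rfl)
  simpa [has_winning_substring_alt] using h

-- ===== VERDICT (by name: the statement is the Claim_ definition above) =====
theorem has_winning_substring_spec : Claim_equal_has_winning_substring := by
  intro s _
  unfold Spec_has_winning_substring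
  rw [A_eq_win4, B_eq_win4]
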